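-- pv_equiv track=rewrite | github.com/TheSpiffyOne/Algorithm-2 | rabota3/python.py | lpt_schedule
-- ===== SOURCE A (Python) =====
-- def lpt_schedule(num_machines, jobs):
--     # сортируем работы по убыванию (LPT)
--     jobs_sorted = sorted(jobs, reverse=True)
--     loads = [0] * num_machines
--     assignment = [[] for _ in range(num_machines)]
--     for job in jobs_sorted:
--         # найти машину с минимальной текущей загрузкой (жадный выбор)
--         i = loads.index(min(loads))
--         assignment[i].append(job)
--         loads[i] += job
--     makespan = max(loads) if loads else 0
--     return assignment, loads, makespan
-- ===== SOURCE B (Python) =====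
-- def lpt_schedule(num_machines, jobs):
--     # Priority queue kept as an ascending-sorted list of (load, machine) pairs:
--     # the front is always the least-loaded machine (lowest index on ties),
--     # so no scan of the loads list is needed per job.
--     pq = [(0, i) for i in range(num_machines)]
--     assignment = [[] for _ in range(num_machines)]
--     for job in sorted(jobs, reverse=True):
--         load, i = pq.pop(0)
--         assignment[i].append(job)
--         entry = (load + job, i)
--         k = 0
--         while k < len(pq) and pq[k] < entry:
--             k += 1
--         pq.insert(k, entry)
--     loads = [0] * num_machines
--     for load, i in pq:
--         loads[i] = load
--     makespan = max(loads) if loads else 0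
--     return assignment, loads, makespan
-- ===== Notes on version B (the rewrite author's own statement) =====
-- stated objective: alternative
-- what changed: B replaces A's per-job linear scan of the loads list (min + index) by a priority queue kept as an ascending-sorted list of (load, machine) pairs whose front is always the least-loaded machine, reconstructing the loads list from the queue at the end.
import Mathlib
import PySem

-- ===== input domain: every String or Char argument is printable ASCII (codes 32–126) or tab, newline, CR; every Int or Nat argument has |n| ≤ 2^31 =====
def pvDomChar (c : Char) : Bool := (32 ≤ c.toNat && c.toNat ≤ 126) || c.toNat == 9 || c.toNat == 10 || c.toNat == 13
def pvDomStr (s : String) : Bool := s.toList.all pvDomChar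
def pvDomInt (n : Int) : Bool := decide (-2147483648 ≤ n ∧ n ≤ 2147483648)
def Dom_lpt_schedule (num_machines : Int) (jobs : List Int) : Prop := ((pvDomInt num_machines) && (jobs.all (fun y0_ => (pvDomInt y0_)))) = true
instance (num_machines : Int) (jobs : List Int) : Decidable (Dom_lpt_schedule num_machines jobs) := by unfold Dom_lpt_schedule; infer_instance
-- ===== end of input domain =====

-- B replaces A's per-job scan of the loads list (min, then index) by a priority queue kept as an
-- ascending-sorted list of (load, machine) pairs; same output wherever Python A returns.

-- ===== PORT A =====
-- A's loop body: find the machine with minimal load (min, then its first index), append, add.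
def stepA (st : List (List Int) × List Int) (job : Int) : List (List Int) × List Int :=
  match PySem.List.min? st.2 (fun x => x) with
  | none => st          -- Python raises ValueError here (min of empty loads); outside Pre_
  | some mn =>
    match PySem.List.index? st.2 mn with
    | none => st        -- unreachable: mn ∈ loads
    | some i =>
      (st.1.set i ((st.1.getD i []) ++ [job]), st.2.set i ((st.2.getD i 0) + job))

def lpt_schedule (num_machines : Int) (jobs : List Int) : List (List Int) × List Int × Int :=
  let jobs_sorted := PySem.List.sorted jobs (fun x => x) true
  let m := num_machines.toNat
  let st := jobs_sorted.foldl stepA (List.replicate m ([] : List Int), List.replicate m (0 : Int))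
  let makespan := match PySem.List.max? st.2 (fun x => x) with
    | none => 0
    | some mx => mx
  (st.1, st.2, makespan)

-- ===== PORT B =====
-- Python tuple '<' on (Int × Int)
def pairLt (a b : Int × Int) : Bool := a.1 < b.1 || (a.1 == b.1 && a.2 < b.2)

-- B's while-loop insertion into the sorted queue
def pqInsert (e : Int × Int) : List (Int × Int) → List (Int × Int)
  | [] => [e]
  | x :: xs => if pairLt x e then x :: pqInsert e xs else e :: x :: xs

-- B's loop body: pop the front of the queue, append the job there, re-insert the updated pair.
def stepB (st : List (List Int) × List (Int × Int)) (job : Int) : List (List Int) × List (Int × Int) :=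
  match st.2 with
  | [] => st            -- Python raises IndexError here (pop from empty queue); outside Pre_
  | (load, i) :: rest =>
    (st.1.set i.toNat ((st.1.getD i.toNat []) ++ [job]), pqInsert (load + job, i) rest)

def lpt_schedule_alt (num_machines : Int) (jobs : List Int) : List (List Int) × List Int × Int :=
  let m := num_machines.toNat
  let pq0 : List (Int × Int) := (List.range m).map (fun i : Nat => ((0 : Int), (i : Int)))
  let st := (PySem.List.sorted jobs (fun x => x) true).foldl stepB
    (List.replicate m ([] : List Int), pq0)
  let loads := st.2.foldl (fun l p => l.set p.2.toNat p.1) (List.replicate m (0 : Int))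
  let makespan := match PySem.List.max? loads (fun x => x) with
    | none => 0
    | some mx => mx
  (st.1, loads, makespan)

-- ===== PRECONDITION & SPEC =====
-- Pre_ excludes exactly the inputs where Python A raises (ValueError: min of an empty loads
-- list, i.e. num_machines ≤ 0 with a nonempty job list); Python B raises there too (IndexError).
def Pre_lpt_schedule (num_machines : Int) (jobs : List Int) : Prop :=
  0 < num_machines ∨ jobs = []
instance (num_machines : Int) (jobs : List Int) : Decidable (Pre_lpt_schedule num_machines jobs) := by
  unfold Pre_lpt_schedule; infer_instance
def pvWitness_lpt_schedule : Int × List Int := (3, [5, 2, 7, 1])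

def Spec_lpt_schedule (num_machines : Int) (jobs : List Int) (out : List (List Int) × List Int × Int) : Prop := out = lpt_schedule_alt num_machines jobs
instance (num_machines : Int) (jobs : List Int) (out : List (List Int) × List Int × Int) : Decidable (Spec_lpt_schedule num_machines jobs out) := by unfold Spec_lpt_schedule; infer_instance

-- ===== CLAIM (what is proved, stated in full; the proofs are below) =====
def Claim_equal_lpt_schedule : Prop := ∀ (num_machines : Int) (jobs : List Int), Dom_lpt_schedule num_machines jobs → Pre_lpt_schedule num_machines jobs → Spec_lpt_schedule num_machines jobs (lpt_schedule num_machines jobs)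

-- ===== LEMMAS AND PROOFS =====

-- enumeration of the loads list as (load, index) pairs, indices starting at s
def enumP (s : Int) : List Int → List (Int × Int)
  | [] => []
  | x :: xs => (x, s) :: enumP (s + 1) xs

-- non-strict lexicographic order used for the queue invariant
def ple (a b : Int × Int) : Prop := a.1 < b.1 ∨ (a.1 = b.1 ∧ a.2 ≤ b.2)

theorem mem_enumP (s : Int) (xs : List Int) (p : Int × Int) :
    p ∈ enumP s xs ↔ ∃ (k : Nat), ∃ (_ : k < xs.length), p = (xs[k], s + k) := by
  induction xs generalizing s with
  | nil => simp [enumP]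
  | cons x xs ih =>
    simp only [enumP, List.mem_cons, ih]
    constructor
    · rintro (rfl | ⟨k, hk, rfl⟩)
      · exact ⟨0, by simp, by simp⟩
      · exact ⟨k + 1, by simpa using hk, by simp; ring⟩
    · rintro ⟨k, hk, rfl⟩
      cases k with
      | zero => left; simp
      | succ k => right; exact ⟨k, by simpa using hk, by simp; ring⟩

theorem length_enumP (s : Int) (xs : List Int) : (enumP s xs).length = xs.length := by
  induction xs generalizing s with
  | nil => rfl
  | cons x xs ih => simp [enumP, ih]

theorem enumP_set (s : Int) (xs : List Int) (k : Nat) (v : Int) (hk : k < xs.length) :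
    enumP s (xs.set k v) = (enumP s xs).set k (v, s + k) := by
  induction xs generalizing s k with
  | nil => simp at hk
  | cons x xs ih =>
    cases k with
    | zero => simp [enumP]
    | succ k =>
      simp only [List.set_cons_succ, enumP, List.length_cons] at *
      rw [ih (s+1) k (by omega)]
      congr 2
      simp only [Prod.mk.injEq, true_and]
      omega

theorem pairwise_snd_enumP (s : Int) (xs : List Int) :
    (enumP s xs).Pairwise (fun p q => p.2 < q.2) := by
  induction xs generalizing s with
  | nil => simp [enumP]
  | cons x xs ih =>
    refine List.pairwise_cons.mpr ⟨?_, ih (s+1)⟩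
    intro q hq
    rcases (mem_enumP _ _ _).mp hq with ⟨k, hk, rfl⟩
    simp
    omega

theorem enumP_replicate (s : Int) (m : Nat) :
    enumP s (List.replicate m (0 : Int)) = (List.range m).map (fun k : Nat => ((0 : Int), s + (k : Int))) := by
  induction m generalizing s with
  | zero => rfl
  | succ m ih =>
    rw [List.replicate_succ]
    simp only [enumP, ih (s+1)]
    rw [List.range_succ_eq_map, List.map_cons, List.map_map]
    congr 1
    · norm_num
    · refine List.map_congr_left fun a _ => ?_
      simp only [Function.comp_apply, Prod.mk.injEq, true_and]
      omega

theorem perm_set_cons_eraseIdx {α : Type} (l : List α) (n : Nat) (e : α) (hn : n < l.length) :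
    (l.set n e).Perm (e :: l.eraseIdx n) := by
  rw [List.set_eq_take_cons_drop e hn, List.eraseIdx_eq_take_drop_succ]
  exact List.perm_middle

theorem perm_cons_eraseIdx {α : Type} (l : List α) (n : Nat) (hn : n < l.length) :
    l.Perm (l[n] :: l.eraseIdx n) := by
  have := perm_set_cons_eraseIdx l n l[n] hn
  simpa using this

theorem pqInsert_perm (e : Int × Int) (l : List (Int × Int)) : (pqInsert e l).Perm (e :: l) := by
  induction l with
  | nil => rfl
  | cons x xs ih =>
    simp only [pqInsert]
    split
    · exact (ih.cons x).trans (List.Perm.swap e x xs)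
    · rfl

theorem ple_total (a b : Int × Int) : pairLt a b = false → ple b a := by
  cases a; cases b; simp [pairLt, ple]; omega

theorem ple_of_pairLt (a b : Int × Int) : pairLt a b = true → ple a b := by
  cases a; cases b; simp [pairLt, ple]; omega

theorem ple_trans (a b c : Int × Int) : ple a b → ple b c → ple a c := by
  cases a; cases b; cases c; simp [ple]; omega

theorem pqInsert_pairwise (e : Int × Int) (l : List (Int × Int))
    (h : l.Pairwise ple) : (pqInsert e l).Pairwise ple := by
  induction l with
  | nil => simp [pqInsert]
  | cons x xs ih =>
    rcases List.pairwise_cons.mp h with ⟨hx, hxs⟩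
    simp only [pqInsert]
    split
    · rename_i hlt
      refine List.pairwise_cons.mpr ⟨?_, ih hxs⟩
      intro y hy
      have : y ∈ e :: xs := (pqInsert_perm e xs).mem_iff.mp hy
      rcases List.mem_cons.mp this with rfl | hy'
      · exact ple_of_pairLt _ _ hlt
      · exact hx y hy'
    · rename_i hge
      refine List.pairwise_cons.mpr ⟨?_, h⟩
      intro y hy
      have he : ple e x := ple_total _ _ (by simpa using hge)
      rcases List.mem_cons.mp hy with rfl | hy'
      · exact he
      · exact ple_trans _ _ _ he (hx y hy')

theorem enumP_eq_nil (s : Int) (xs : List Int) : enumP s xs = [] ↔ xs = [] := by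
  cases xs <;> simp [enumP]

theorem getElem_enumP (s : Int) (xs : List Int) (k : Nat) (hk : k < xs.length) :
    (enumP s xs)[k]'(by rw [length_enumP]; exact hk) = (xs[k], s + k) := by
  induction xs generalizing s k with
  | nil => simp at hk
  | cons x xs ih =>
    cases k with
    | zero => simp [enumP]
    | succ k =>
      simp only [enumP, List.getElem_cons_succ]
      rw [ih (s+1) k (by simpa using hk)]
      simp only [Prod.mk.injEq, true_and]
      omega

theorem mem_loads_exists (loads : List Int) (y : Int) (hy : y ∈ loads) :
    ∃ (k : Nat) (hk : k < loads.length), loads[k] = y := by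
  rcases List.mem_iff_getElem.mp hy with ⟨k, hk, h⟩
  exact ⟨k, hk, h⟩

theorem min?_of_head (loads : List Int) (pq : List (Int × Int)) (load : Int) (k : Nat)
    (hpw : pq.Pairwise ple) (hperm : pq.Perm (enumP 0 loads))
    (hpq : pq = (load, (k : Int)) :: rest) (hk : k < loads.length) (hlk : loads[k] = load) :
    PySem.List.min? loads (fun x => x) = some load := by
  have hne : loads ≠ [] := by intro h; subst h; simp at hk
  cases hmin : PySem.List.min? loads (fun x => x) with
  | none => exact absurd ((PySem.List.min?_eq_none_iff loads (fun x => x)).mp hmin) hne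
  | some m' =>
    have hm'mem : m' ∈ loads := PySem.List.min?_mem hmin
    have hmin' := PySem.List.min?_isMin hmin
    have hloadmem : load ∈ loads := hlk ▸ List.getElem_mem hk
    have h1 : m' ≤ load := hmin' load hloadmem
    -- load ≤ m'
    rcases mem_loads_exists loads m' hm'mem with ⟨k', hk', hlk'⟩
    have hmem : (m', (k' : Int)) ∈ pq := by
      apply hperm.mem_iff.mpr
      rw [mem_enumP]
      exact ⟨k', hk', by simp [hlk']⟩
    have h2 : load ≤ m' := by
      rw [hpq] at hmem
      rcases List.mem_cons.mp hmem with h | h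
      · simp only [Prod.mk.injEq] at h; omega
      · have := (List.pairwise_cons.mp (hpq ▸ hpw)).1 _ h
        rcases this with h | ⟨h, _⟩ <;> omega
    have : m' = load := le_antisymm h1 h2
    rw [this]

theorem index?_of_head (loads : List Int) (pq : List (Int × Int)) (load : Int) (k : Nat)
    (hpw : pq.Pairwise ple) (hperm : pq.Perm (enumP 0 loads))
    (hpq : pq = (load, (k : Int)) :: rest) (hk : k < loads.length) (hlk : loads[k] = load) :
    PySem.List.index? loads load = some k := by
  rw [PySem.List.index?_eq_some_iff]
  refine ⟨loads.take k, loads.drop (k+1), ?_, by simp [hk.le], ?_⟩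
  · conv_lhs => rw [← List.take_append_drop k loads]
    congr 1
    rw [List.drop_eq_getElem_cons hk, hlk]
  · intro hmem
    rcases List.mem_iff_getElem.mp hmem with ⟨j, hj, hlj⟩
    rw [List.getElem_take] at hlj
    have hjk : j < k := by simp at hj; omega
    have hmemj : (load, (j : Int)) ∈ pq := by
      apply hperm.mem_iff.mpr
      rw [mem_enumP]
      exact ⟨j, by omega, by simp [hlj]⟩
    rw [hpq] at hmemj
    rcases List.mem_cons.mp hmemj with h | h
    · simp only [Prod.mk.injEq] at h; omega
    · have := (List.pairwise_cons.mp (hpq ▸ hpw)).1 _ h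
      rcases this with h | ⟨_, h⟩ <;> simp at h <;> omega

theorem step_sim (asg : List (List Int)) (loads : List Int) (pq : List (Int × Int)) (job : Int)
    (hpw : pq.Pairwise ple) (hperm : pq.Perm (enumP 0 loads)) :
    (stepA (asg, loads) job).1 = (stepB (asg, pq) job).1 ∧
    (stepB (asg, pq) job).2.Pairwise ple ∧
    (stepB (asg, pq) job).2.Perm (enumP 0 (stepA (asg, loads) job).2) := by
  cases hpq : pq with
  | nil =>
    have hl : loads = [] := by
      have := hpq ▸ hperm
      exact (enumP_eq_nil 0 loads).mp (List.Perm.nil_eq this).symm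
    subst hl
    simp [stepA, stepB, hpq, (PySem.List.min?_eq_none_iff ([] : List Int) (fun x => x)).mpr rfl,
      enumP, hpq ▸ hperm]
  | cons hd rest =>
    obtain ⟨load, i⟩ := hd
    -- the head comes from the enumeration: i = ↑k with loads[k] = load
    have hmem : (load, i) ∈ enumP 0 loads := hperm.mem_iff.mp (by rw [hpq]; exact List.mem_cons_self)
    rcases (mem_enumP _ _ _).mp hmem with ⟨k, hk, hp⟩
    have hi : i = (k : Int) := by simp at hp; omega
    have hlk : loads[k] = load := by simp at hp; omega
    subst hi
    have hmin := min?_of_head loads pq load k hpw hperm hpq hk hlk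
    have hidx := index?_of_head loads pq load k hpw hperm hpq hk hlk
    have htn : ((k : Int)).toNat = k := by simp
    simp only [PySem.List.index?_eq_idxOf?] at hidx
    constructor
    · simp [stepA, stepB, hpq, hmin, hidx, htn]
    constructor
    · -- pairwise preserved
      simp only [stepB, hpq]
      exact pqInsert_pairwise _ _ (List.pairwise_cons.mp (hpq ▸ hpw)).2
    · -- permutation preserved
      have hgetD : loads[k]?.getD 0 = load := by
        rw [List.getElem?_eq_getElem hk]; simpa using hlk
      simp only [stepA, stepB, hpq, PySem.List.index?_eq_idxOf?, hmin, hidx, List.getD_eq_getElem?_getD, hgetD, htn]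
      have hlen : k < (enumP 0 loads).length := by rw [length_enumP]; exact hk
      have h1 : (pqInsert (load + job, (k:Int)) rest).Perm ((load + job, (k:Int)) :: rest) :=
        pqInsert_perm _ _
      have h2 : rest.Perm ((enumP 0 loads).eraseIdx k) := by
        have hc := perm_cons_eraseIdx (enumP 0 loads) k hlen
        rw [getElem_enumP 0 loads k hk] at hc
        have : ((load, (k:Int)) :: rest).Perm ((loads[k], 0 + (k:Int)) :: (enumP 0 loads).eraseIdx k) :=
          (hpq ▸ hperm).trans hc
        rw [hlk] at this
        simp only [zero_add] at this
        exact this.cons_inv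
      have h3 : (enumP 0 (loads.set k (load + job))).Perm
          ((load + job, (k:Int)) :: (enumP 0 loads).eraseIdx k) := by
        rw [enumP_set 0 loads k (load + job) hk]
        have := perm_set_cons_eraseIdx (enumP 0 loads) k (load + job, 0 + (k:Int)) hlen
        simpa using this
      exact (h1.trans (h2.cons _)).trans h3.symm

theorem sim (js : List Int) : ∀ (asg : List (List Int)) (loads : List Int) (pq : List (Int × Int)),
    pq.Pairwise ple → pq.Perm (enumP 0 loads) →
    (js.foldl stepA (asg, loads)).1 = (js.foldl stepB (asg, pq)).1 ∧
    (js.foldl stepB (asg, pq)).2.Pairwise ple ∧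
    (js.foldl stepB (asg, pq)).2.Perm (enumP 0 (js.foldl stepA (asg, loads)).2) := by
  induction js with
  | nil => intro asg loads pq hpw hperm; exact ⟨rfl, hpw, hperm⟩
  | cons j js ih =>
    intro asg loads pq hpw hperm
    obtain ⟨h1, h2, h3⟩ := step_sim asg loads pq j hpw hperm
    simp only [List.foldl_cons]
    rcases hA : stepA (asg, loads) j with ⟨a1, l1⟩
    rcases hB : stepB (asg, pq) j with ⟨b1, p1⟩
    rw [hA] at h1 h3
    rw [hB] at h1 h2 h3
    simp only at h1 h2 h3
    subst h1
    exact ih a1 l1 p1 h2 h3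

theorem recon (loads : List Int) : ∀ (ps : List (Int × Int)) (acc : List Int)
    (_ : ∀ p ∈ ps, ∃ (k : Nat) (_ : k < loads.length), p = (loads[k], (k : Int)))
    (_ : (ps.map (·.2)).Nodup)
    (hlen : acc.length = loads.length)
    (_ : ∀ (j : Nat) (hj : j < loads.length),
      ((j : Int) ∈ ps.map (·.2)) ∨ acc[j]'(by omega) = loads[j]),
    ps.foldl (fun l p => l.set p.2.toNat p.1) acc = loads := by
  intro ps
  induction ps with
  | nil =>
    intro acc _ _ hlen hagree
    apply List.ext_getElem hlen
    intro j hj1 hj2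
    rcases hagree j hj2 with h | h
    · simp at h
    · exact h
  | cons p ps ih =>
    intro acc hform hnd hlen hagree
    rcases hform p List.mem_cons_self with ⟨k, hk, rfl⟩
    simp only [List.foldl_cons, Int.toNat_natCast]
    refine ih (acc.set k loads[k])
      (fun q hq => hform q (List.mem_cons_of_mem _ hq))
      ((List.nodup_cons.mp (by simpa using hnd)).2) (by simp [hlen]) ?_
    intro j hj
    by_cases hjps : ((j : Int)) ∈ ps.map (·.2)
    · exact Or.inl hjps
    · right
      by_cases hjk : j = k
      · subst hjk
        rw [List.getElem_set_self (by simp [hlen]; omega)]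
      · rw [List.getElem_set_ne (fun hh => hjk hh.symm)]
        rcases hagree j hj with h | h
        · rw [List.map_cons] at h
          rcases List.mem_cons.mp h with h | h
          · exfalso; simp at h; omega
          · exact absurd h hjps
        · exact h

theorem lenA (js : List Int) : ∀ (st : List (List Int) × List Int),
    (js.foldl stepA st).2.length = st.2.length := by
  induction js with
  | nil => intro st; rfl
  | cons j js ih =>
    intro st
    rw [List.foldl_cons, ih]
    unfold stepA
    cases hmn : PySem.List.min? st.2 (fun x => x) with
    | none => simp [hmn]
    | some mn =>
      simp only [PySem.List.index?_eq_idxOf?]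
      cases hix : List.idxOf? mn st.2 with
      | none => simp [hmn, hix]
      | some i => simp [hmn, hix]

theorem pq0_pairwise (m : Nat) :
    (((List.range m).map (fun i : Nat => ((0 : Int), (i : Int)))).Pairwise ple) := by
  refine List.pairwise_map.mpr ?_
  refine List.Pairwise.imp ?_ (List.pairwise_lt_range)
  intro a b hab
  right
  exact ⟨rfl, by omega⟩

theorem pq0_eq (m : Nat) :
    (List.range m).map (fun i : Nat => ((0 : Int), (i : Int))) = enumP 0 (List.replicate m (0 : Int)) := by
  rw [enumP_replicate]
  refine List.map_congr_left fun a _ => ?_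
  simp

theorem lpt_schedule_eq_alt (num_machines : Int) (jobs : List Int) :
    lpt_schedule num_machines jobs = lpt_schedule_alt num_machines jobs := by
  unfold lpt_schedule lpt_schedule_alt
  simp only
  set m := num_machines.toNat with hm
  set js := PySem.List.sorted jobs (fun x => x) true with hjs
  obtain ⟨h1, h2, h3⟩ := sim js (List.replicate m ([] : List Int))
    (List.replicate m (0 : Int)) ((List.range m).map (fun i : Nat => ((0 : Int), (i : Int))))
    (pq0_pairwise m) (by rw [pq0_eq])
  set stA := js.foldl stepA (List.replicate m ([] : List Int), List.replicate m (0 : Int)) with hstA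
  set stB := js.foldl stepB (List.replicate m ([] : List Int),
    (List.range m).map (fun i : Nat => ((0 : Int), (i : Int)))) with hstB
  have hlenA : stA.2.length = m := by rw [hstA, lenA]; simp
  have hrec : stB.2.foldl (fun l p => l.set p.2.toNat p.1) (List.replicate m (0 : Int)) = stA.2 := by
    refine recon stA.2 stB.2 _ ?_ ?_ (by simpa using hlenA.symm) ?_
    · intro p hp
      rcases (mem_enumP _ _ _).mp (h3.mem_iff.mp hp) with ⟨k, hk, hkp⟩
      exact ⟨k, hk, by simpa using hkp⟩
    · have hpm : (stB.2.map (·.2)).Perm ((enumP 0 stA.2).map (·.2)) := h3.map _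
      refine hpm.nodup_iff.mpr ?_
      have hp := pairwise_snd_enumP 0 stA.2
      have hlt : ((enumP 0 stA.2).map (·.2)).Pairwise (· < ·) :=
        List.Pairwise.map _ (fun a b h => h) hp
      exact hlt.imp ne_of_lt
    · intro j hj
      left
      have : (stA.2[j], (j : Int)) ∈ enumP 0 stA.2 :=
        (mem_enumP _ _ _).mpr ⟨j, hj, by simp⟩
      exact List.mem_map_of_mem (h3.mem_iff.mpr this)
  rw [hrec]
  rw [h1]

-- ===== VERDICT (by name: the statement is the Claim_ definition above) =====
theorem lpt_schedule_spec : Claim_equal_lpt_schedule := by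
  intro num_machines jobs _ _
  unfold Spec_lpt_schedule
  exact lpt_schedule_eq_alt num_machines jobs
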